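-- pv_equiv track=rewrite | github.com/andyjengnctu/My_Quant_Project | tools/validate/preflight_env.py | _normalize_local_regression_steps
-- ===== SOURCE A (Python) =====
-- from typing import Any, Dict, Iterable, List, Optional, Tuple
--
-- _LOCAL_REGRESSION_STEP_ORDER = ("quick_gate", "consistency", "chain_checks", "ml_smoke")
--
-- def _normalize_local_regression_steps(selected_steps: Optional[Iterable[str]]) -> List[str]:
--     if selected_steps is None:
--         return []
--
--     normalized: List[str] = []
--     seen = set()
--     invalid: List[str] = []
--     for raw_name in selected_steps:
--         name = str(raw_name).strip()
--         if not name: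
--             continue
--         if name not in _LOCAL_REGRESSION_STEP_ORDER:
--             invalid.append(name)
--             continue
--         if name in seen:
--             continue
--         normalized.append(name)
--         seen.add(name)
--
--     if invalid:
--         valid_text = ", ".join(_LOCAL_REGRESSION_STEP_ORDER)
--         raise ValueError(f"--steps 只接受 {valid_text}，收到: {', '.join(invalid)}")
--     return normalized
-- ===== SOURCE B (Python) =====
-- from typing import Iterable, List, Optional
--
-- _LOCAL_REGRESSION_STEP_ORDER = ("quick_gate", "consistency", "chain_checks", "ml_smoke")
--
-- def _normalize_local_regression_steps(selected_steps: Optional[Iterable[str]]) -> List[str]: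
--     if selected_steps is None:
--         return []
--     names = [n for n in (str(raw).strip() for raw in selected_steps) if n]
--     invalid = [n for n in names if n not in _LOCAL_REGRESSION_STEP_ORDER]
--     if invalid:
--         valid_text = ", ".join(_LOCAL_REGRESSION_STEP_ORDER)
--         raise ValueError(f"--steps 只接受 {valid_text}，收到: {', '.join(invalid)}")
--     return list(dict.fromkeys(names))
-- ===== Notes on version B (the rewrite author's own statement) =====
-- stated objective: simpler
-- what changed: Replaces A's single fused loop with three accumulators (normalized list, seen set, invalid list) by three flat passes over an intermediate list: one comprehension stripping and dropping empty names, one filter collecting invalid names for the identical ValueError, and an order-preserving dict.fromkeys dedup.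
import Mathlib
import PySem

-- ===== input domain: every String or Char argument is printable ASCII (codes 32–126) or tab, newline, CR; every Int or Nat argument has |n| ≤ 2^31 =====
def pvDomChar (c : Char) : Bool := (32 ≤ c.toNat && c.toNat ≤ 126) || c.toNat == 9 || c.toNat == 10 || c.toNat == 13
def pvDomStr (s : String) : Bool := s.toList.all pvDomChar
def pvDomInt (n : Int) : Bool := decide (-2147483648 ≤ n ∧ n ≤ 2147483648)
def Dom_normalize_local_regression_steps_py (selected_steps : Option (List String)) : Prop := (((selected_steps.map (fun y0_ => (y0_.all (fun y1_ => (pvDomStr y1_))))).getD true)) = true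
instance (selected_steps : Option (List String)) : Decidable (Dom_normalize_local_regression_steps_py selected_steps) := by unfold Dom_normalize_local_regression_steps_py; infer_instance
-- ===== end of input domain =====

-- B restructures A's single fused validate/dedup loop into three flat passes
-- (strip+filter, invalid scan, order-preserving dedup); objective: simpler.
-- Pre_ excludes only inputs on which Python A raises ValueError (a stripped
-- non-empty name outside the step-order tuple); A returns no value there.

-- ===== PORT A =====
def pvStepOrder : List String := ["quick_gate", "consistency", "chain_checks", "ml_smoke"]

-- the body of A's for-loop (state: normalized, seen, invalid)
def pvStepA (st : List String × PySem.Set String × List String) (raw_name : String) :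
    List String × PySem.Set String × List String :=
  let name := PySem.Str.strip raw_name
  if name = "" then st
  else if ¬ name ∈ pvStepOrder then (st.1, st.2.1, st.2.2 ++ [name])
  else if PySem.Set.contains st.2.1 name then st
  else (st.1 ++ [name], PySem.Set.add st.2.1 name, st.2.2)

def normalize_local_regression_steps_py (selected_steps : Option (List String)) : List String :=
  match selected_steps with
  | none => []
  | some xs =>
    let st := xs.foldl pvStepA ([], PySem.Set.empty, [])
    -- Python raises ValueError when st.2.2 (invalid) is non-empty; Pre_ excludes those inputs
    st.1

-- ===== PORT B =====
def normalize_local_regression_steps_py_alt (selected_steps : Option (List String)) : List String :=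
  match selected_steps with
  | none => []
  | some xs =>
    let names := (xs.map PySem.Str.strip).filter (fun n => n ≠ "")
    let invalid := names.filter (fun n => ¬ n ∈ pvStepOrder)
    -- Python raises ValueError when invalid is non-empty; Pre_ excludes those inputs
    if invalid ≠ [] then PySem.List.dedup names
    else PySem.List.dedup names

-- ===== PRECONDITION & SPEC =====
-- Pre_ excludes exactly the inputs on which Python A raises ValueError:
-- some stripped non-empty name is not a known regression step (A returns no value there).
def Pre_normalize_local_regression_steps_py (selected_steps : Option (List String)) : Prop :=
  ∀ s ∈ selected_steps.getD [], PySem.Str.strip s = "" ∨ PySem.Str.strip s ∈ pvStepOrder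
instance (selected_steps : Option (List String)) : Decidable (Pre_normalize_local_regression_steps_py selected_steps) := by unfold Pre_normalize_local_regression_steps_py; infer_instance

def pvWitness_normalize_local_regression_steps_py : Option (List String) :=
  some ["  ml_smoke ", "quick_gate", "", "ml_smoke"]

def Spec_normalize_local_regression_steps_py (selected_steps : Option (List String)) (out : List String) : Prop := out = normalize_local_regression_steps_py_alt selected_steps
instance (selected_steps : Option (List String)) (out : List String) : Decidable (Spec_normalize_local_regression_steps_py selected_steps out) := by unfold Spec_normalize_local_regression_steps_py; infer_instance

-- ===== CLAIM (what is proved, stated in full; the proofs are below) =====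
def Claim_equal_normalize_local_regression_steps_py : Prop := ∀ (selected_steps : Option (List String)), Dom_normalize_local_regression_steps_py selected_steps → Pre_normalize_local_regression_steps_py selected_steps → Spec_normalize_local_regression_steps_py selected_steps (normalize_local_regression_steps_py selected_steps)

-- ===== LEMMAS AND PROOFS =====

-- A's fold, when every name is empty or valid, keeps normalized = seen and
-- computes the Set.add-fold of the stripped non-empty names.
theorem pvFold_eq (xs : List String)
    (h : ∀ s ∈ xs, PySem.Str.strip s = "" ∨ PySem.Str.strip s ∈ pvStepOrder)
    (acc inv : List String) :
    (xs.foldl pvStepA (acc, acc, inv)).1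
    = ((xs.map PySem.Str.strip).filter (fun n => n ≠ "")).foldl PySem.Set.add acc := by
  induction xs generalizing acc inv with
  | nil => simp
  | cons x t ih =>
    have hx := h x (List.mem_cons_self)
    have ht : ∀ s ∈ t, PySem.Str.strip s = "" ∨ PySem.Str.strip s ∈ pvStepOrder :=
      fun s hs => h s (List.mem_cons_of_mem x hs)
    rw [List.foldl_cons, List.map_cons, List.filter_cons]
    by_cases he : PySem.Str.strip x = ""
    · have hstep : pvStepA (acc, acc, inv) x = (acc, acc, inv) := by simp [pvStepA, he]
      rw [hstep, ih ht acc inv]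
      simp [he]
    · have hv : PySem.Str.strip x ∈ pvStepOrder := hx.resolve_left he
      by_cases hm : PySem.Str.strip x ∈ acc
      · have hstep : pvStepA (acc, acc, inv) x = (acc, acc, inv) := by
          simp [pvStepA, he, hv, hm]
        rw [hstep, ih ht acc inv]
        simp [he, List.foldl_cons, PySem.Set.add_of_mem hm]
      · have hstep : pvStepA (acc, acc, inv) x
            = (acc ++ [PySem.Str.strip x], acc ++ [PySem.Str.strip x], inv) := by
          simp [pvStepA, he, hv, hm]
        rw [hstep, ih ht (acc ++ [PySem.Str.strip x]) inv]
        simp only [he, ne_eq, not_false_iff, decide_true, if_pos, List.foldl_cons,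
          PySem.Set.add_of_not_mem hm]

-- ===== VERDICT (by name: the statement is the Claim_ definition above) =====
theorem normalize_local_regression_steps_py_spec : Claim_equal_normalize_local_regression_steps_py := by
  intro selected_steps _ hpre
  unfold Spec_normalize_local_regression_steps_py
  unfold normalize_local_regression_steps_py normalize_local_regression_steps_py_alt
  cases selected_steps with
  | none => rfl
  | some xs =>
    unfold Pre_normalize_local_regression_steps_py at hpre
    simp only [Option.getD_some] at hpre
    show (List.foldl pvStepA ([], PySem.Set.empty, []) xs).1 = _
    rw [show (PySem.Set.empty : PySem.Set String) = ([] : List String) from rfl,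
      pvFold_eq xs hpre [] []]
    simp [PySem.Set.ofList_eq_foldl]
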